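-- pv_equiv track=rewrite | github.com/Alvaropz/Python_problems_BinarySearch | 1. Easy/k_prefix/k_prefix.py | k_prefix
-- ===== SOURCE A (Python) =====
-- def k_prefix(nums, k):
--     list_total = []
--     total = 0
--     for number in nums:
--         total += number
--         list_total.append(total)
--     list_total.reverse()
--     for idx in range(len(list_total)):
--         if list_total[idx] <= k:
--             return len(list_total)-1-idx
--     return -1
-- ===== SOURCE B (Python) =====
-- def k_prefix(nums, k):
--     total = 0
--     best = -1
--     for i, num in enumerate(nums):
--         total += num
--         if total <= k:
--             best = i
--     return best
-- ===== Notes on version B (the rewrite author's own statement) =====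
-- stated objective: simpler
-- what changed: Single forward pass keeping only a running total and the best qualifying index, instead of materialising the prefix-sum list, reversing it, and scanning it for the first element <= k.
import Mathlib
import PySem

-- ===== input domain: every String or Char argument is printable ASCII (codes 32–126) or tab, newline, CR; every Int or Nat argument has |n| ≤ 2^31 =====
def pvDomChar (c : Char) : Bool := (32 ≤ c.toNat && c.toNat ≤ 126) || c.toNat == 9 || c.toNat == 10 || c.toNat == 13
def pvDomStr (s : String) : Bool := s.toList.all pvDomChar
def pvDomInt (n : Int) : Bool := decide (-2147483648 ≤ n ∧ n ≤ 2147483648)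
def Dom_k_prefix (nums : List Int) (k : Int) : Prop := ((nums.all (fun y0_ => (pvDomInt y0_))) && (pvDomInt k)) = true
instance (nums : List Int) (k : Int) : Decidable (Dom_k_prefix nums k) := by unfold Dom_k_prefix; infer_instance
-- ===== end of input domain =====

-- B replaces A's materialised prefix-sum list + reverse + scan by a single forward
-- pass keeping only a running total and the best qualifying index (objective: simpler).


-- ===== PORT A =====
-- the second for-loop of A: for idx in range(len(rev)): if rev[idx] <= k: return n-1-idx; return -1
def kpScan (l : List Int) (k : Int) (n : Int) (idx : Int) : Int :=
  match l with
  | [] => -1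
  | x :: rest => if x ≤ k then n - 1 - idx else kpScan rest k n (idx + 1)

def k_prefix (nums : List Int) (k : Int) : Int :=
  -- first loop: build list_total while accumulating total
  let st := nums.foldl (fun (st : List Int × Int) n => (st.1 ++ [st.2 + n], st.2 + n)) ([], 0)
  let rev := st.1.reverse
  kpScan rev k (rev.length : Int) 0

-- ===== PORT B =====
def k_prefix_alt (nums : List Int) (k : Int) : Int :=
  ((PySem.List.enumerate nums 0).foldl
    (fun (st : Int × Int) (p : Int × Int) =>
      let total := st.1 + p.2
      (total, if total ≤ k then p.1 else st.2)) (0, -1)).2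

-- ===== PRECONDITION & SPEC =====
def Spec_k_prefix (nums : List Int) (k : Int) (out : Int) : Prop := out = k_prefix_alt nums k
instance (nums : List Int) (k : Int) (out : Int) : Decidable (Spec_k_prefix nums k out) := by unfold Spec_k_prefix; infer_instance

-- ===== CLAIM (what is proved, stated in full; the proofs are below) =====
def Claim_equal_k_prefix : Prop := ∀ (nums : List Int) (k : Int), Dom_k_prefix nums k → Spec_k_prefix nums k (k_prefix nums k)

-- ===== LEMMAS AND PROOFS =====

-- A's build loop: length of the accumulated list, and the running total.
theorem kp_build_len (l : List Int) (acc : List Int) (t : Int) :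
    ((l.foldl (fun (st : List Int × Int) n => (st.1 ++ [st.2 + n], st.2 + n)) (acc, t)).1).length
      = acc.length + l.length := by
  induction l generalizing acc t with
  | nil => simp
  | cons x r ih => simp [List.foldl_cons, ih]; omega

theorem kp_build_total (l : List Int) (acc : List Int) (t : Int) :
    (l.foldl (fun (st : List Int × Int) n => (st.1 ++ [st.2 + n], st.2 + n)) (acc, t)).2
      = t + l.sum := by
  induction l generalizing acc t with
  | nil => simp
  | cons x r ih => simp [List.foldl_cons, ih]; ring

-- B's loop: the running total is the sum.
theorem kp_alt_total (l : List Int) (k : Int) (s : Int) (t b : Int) :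
    ((PySem.List.enumerate l s).foldl
      (fun (st : Int × Int) (p : Int × Int) =>
        let total := st.1 + p.2
        (total, if total ≤ k then p.1 else st.2)) (t, b)).1 = t + l.sum := by
  induction l generalizing s t b with
  | nil => simp [PySem.List.enumerate_nil]
  | cons x r ih => simp [PySem.List.enumerate_cons, ih]; ring

-- kpScan only looks at n - 1 - idx, so shifting both by one is invisible.
theorem kpScan_shift (l : List Int) (k : Int) (n idx : Int) :
    kpScan l k (n + 1) (idx + 1) = kpScan l k n idx := by
  induction l generalizing idx with
  | nil => rfl
  | cons x r ih =>
      simp only [kpScan]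
      split_ifs with h
      · omega
      · exact ih (idx + 1)

theorem kp_snoc (l : List Int) (m k : Int) :
    k_prefix (l ++ [m]) k
      = (if l.sum + m ≤ k then (l.length : Int) else k_prefix l k) := by
  simp only [k_prefix, List.foldl_append, List.foldl_cons, List.foldl_nil]
  set st := l.foldl (fun (st : List Int × Int) n => (st.1 ++ [st.2 + n], st.2 + n)) ([], 0) with hst
  have hlen : st.1.length = l.length := by
    have := kp_build_len l [] 0; simpa [← hst] using this
  have htot : st.2 = l.sum := by
    have := kp_build_total l [] 0; simpa [← hst] using this
  simp only [List.reverse_append, List.reverse_cons, List.reverse_nil, List.nil_append,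
    List.singleton_append, List.length_cons, List.length_reverse, hlen, htot]
  simp only [kpScan]
  push_cast
  split_ifs with h
  · omega
  · have := kpScan_shift st.1.reverse k (l.length : Int) 0
    simp only [List.length_reverse, hlen] at this
    convert this using 2 <;> omega

theorem kp_alt_snoc (l : List Int) (m k : Int) :
    k_prefix_alt (l ++ [m]) k
      = (if l.sum + m ≤ k then (l.length : Int) else k_prefix_alt l k) := by
  simp only [k_prefix_alt, PySem.List.enumerate_append, List.foldl_append,
    PySem.List.enumerate_cons, PySem.List.enumerate_nil, List.foldl_cons, List.foldl_nil]
  set st := (PySem.List.enumerate l 0).foldl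
      (fun (st : Int × Int) (p : Int × Int) =>
        (st.1 + p.2, if st.1 + p.2 ≤ k then p.1 else st.2)) ((0 : Int), (-1 : Int)) with hst
  have htot : st.1 = l.sum := by
    have := kp_alt_total l k 0 0 (-1); simpa [← hst] using this
  simp [htot]

-- ===== VERDICT (by name: the statement is the Claim_ definition above) =====
theorem k_prefix_spec : Claim_equal_k_prefix := by
  intro nums k _
  unfold Spec_k_prefix
  induction nums using List.reverseRecOn with
  | nil => rfl
  | append_singleton l m ih =>
      rename_i hd
      have hd' : Dom_k_prefix l k := by
        unfold Dom_k_prefix at hd ⊢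
        simp only [List.all_append, Bool.and_assoc] at hd
        simp_all
      rw [kp_snoc, kp_alt_snoc, ih hd']
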